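-- pv_equiv track=rewrite | github.com/WildDogOne/azure-pim-audit | Audit_EntraID.py | convert_to_common_table
-- ===== SOURCE A (Python) =====
-- def convert_to_common_table(assignment_dict):
--     ct = []
--     for user in assignment_dict:
--         for role in assignment_dict[user]:
--             ct.append({"Benutzer": user, "Rolle": role})
--     ct = sorted(
--         ct,
--         key=lambda x: (x["Benutzer"], x["Rolle"]),
--         reverse=False,
--     )
--     return ct
-- ===== SOURCE B (Python) =====
-- def convert_to_common_table(assignment_dict):
--     return [
--         {"Benutzer": user, "Rolle": role}
--         for user in sorted(assignment_dict)
--         for role in sorted(assignment_dict[user])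
--     ]
-- ===== Notes on version B (the rewrite author's own statement) =====
-- stated objective: idiomatic
-- what changed: B emits the records already in order by iterating sorted keys and, per key, sorted roles in one comprehension, instead of building an unordered list and sorting it by a composite tuple key at the end.
import Mathlib
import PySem

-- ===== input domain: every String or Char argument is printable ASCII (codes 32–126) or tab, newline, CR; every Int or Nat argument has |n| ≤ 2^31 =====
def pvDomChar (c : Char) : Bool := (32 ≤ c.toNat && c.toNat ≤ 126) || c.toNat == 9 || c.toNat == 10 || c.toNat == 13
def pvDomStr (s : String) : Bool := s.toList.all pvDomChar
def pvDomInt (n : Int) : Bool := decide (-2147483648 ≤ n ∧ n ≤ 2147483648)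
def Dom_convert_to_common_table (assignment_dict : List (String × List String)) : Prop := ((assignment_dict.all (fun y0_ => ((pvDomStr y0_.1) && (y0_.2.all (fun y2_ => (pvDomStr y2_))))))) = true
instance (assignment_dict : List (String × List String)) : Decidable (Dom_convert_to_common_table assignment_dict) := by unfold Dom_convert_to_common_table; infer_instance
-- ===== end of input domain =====

-- B builds the table already in order (sorted keys, then sorted roles per key) instead of sorting the flat record list at the end; objective: idiomatic.


-- ===== PORT A =====
-- shared helper: 'assignment_dict[user]' — dict lookup (the key is always present when called, so the default is never used)
def pvGetRoles (assignment_dict : List (String × List String)) (user : String) : List String :=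
  (PySem.Dict.mk assignment_dict).getD user []

-- shared helper: 'for user in assignment_dict' — iterating a Python dict yields its distinct keys in insertion order
def pvUsers (assignment_dict : List (String × List String)) : List String :=
  PySem.List.dedup (assignment_dict.map (·.1))

-- the record {"Benutzer": user, "Rolle": role}
def pvRec (user role : String) : List (String × String) := [("Benutzer", user), ("Rolle", role)]

-- 'x["Benutzer"]' / 'x["Rolle"]' in A's sort key (always present on the records A builds)
def pvKey1 (x : List (String × String)) : String := (PySem.Dict.mk x).getD "Benutzer" ""
def pvKey2 (x : List (String × String)) : String := (PySem.Dict.mk x).getD "Rolle" ""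

def convert_to_common_table (assignment_dict : List (String × List String)) : List (List (String × String)) :=
  let ct := (pvUsers assignment_dict).foldl
    (fun acc user => (pvGetRoles assignment_dict user).foldl
      (fun acc role => acc ++ [pvRec user role]) acc) []
  PySem.List.sorted2 ct pvKey1 pvKey2 false

-- ===== PORT B =====
def convert_to_common_table_alt (assignment_dict : List (String × List String)) : List (List (String × String)) :=
  (PySem.List.sorted (pvUsers assignment_dict) (fun u => u) false).flatMap
    (fun user => (PySem.List.sorted (pvGetRoles assignment_dict user) (fun r => r) false).map
      (fun role => pvRec user role))

-- ===== PRECONDITION & SPEC =====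
def Spec_convert_to_common_table (assignment_dict : List (String × List String)) (out : List (List (String × String))) : Prop := out = convert_to_common_table_alt assignment_dict
instance (assignment_dict : List (String × List String)) (out : List (List (String × String))) : Decidable (Spec_convert_to_common_table assignment_dict out) := by unfold Spec_convert_to_common_table; infer_instance

-- ===== CLAIM (what is proved, stated in full; the proofs are below) =====
def Claim_equal_convert_to_common_table : Prop := ∀ (assignment_dict : List (String × List String)), Dom_convert_to_common_table assignment_dict → Spec_convert_to_common_table assignment_dict (convert_to_common_table assignment_dict)

-- ===== LEMMAS AND PROOFS =====

-- the sort keys of a record are its two components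
theorem pvKey1_rec (u r : String) : pvKey1 (pvRec u r) = u := by
  simp [pvKey1, pvRec, PySem.Dict.getD_eq_get?_getD, PySem.Dict.get?_mk_cons]

theorem pvKey2_rec (u r : String) : pvKey2 (pvRec u r) = r := by
  simp [pvKey2, pvRec, PySem.Dict.getD_eq_get?_getD, PySem.Dict.get?_mk_cons]

-- insertBy commutes with map when the comparison is pulled back through the map
theorem pv_insertBy_map {α β : Type} (b : β → β → Bool) (f : α → β) (x : α) (l : List α) :
    PySem.List.insertBy b (f x) (l.map f)
      = (PySem.List.insertBy (fun p q => b (f p) (f q)) x l).map f := by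
  induction l with
  | nil => simp [PySem.List.insertBy]
  | cons y ys ih =>
      simp only [List.map_cons, PySem.List.insertBy]
      by_cases h : b (f x) (f y) = true <;> simp [h, ih]

-- sorting a mapped list sorts the underlying list (key pulled back through the map)
theorem pv_sorted_map {α β κ : Type} [LinearOrder κ] (f : α → β) (key : β → κ) (xs : List α) :
    PySem.List.sorted (xs.map f) key false
      = (PySem.List.sorted xs (fun x => key (f x)) false).map f := by
  show (xs.map f).foldl (fun a x => PySem.List.insertBy (fun p q => decide (key p < key q)) x a) (([] : List α).map f)
      = (xs.foldl (fun a x => PySem.List.insertBy (fun p q => decide (key (f p) < key (f q))) x a) []).map f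
  generalize ([] : List α) = acc
  induction xs generalizing acc with
  | nil => rfl
  | cons y ys ih =>
      simp only [List.map_cons, List.foldl_cons]
      rw [pv_insertBy_map (fun p q => decide (key p < key q)) f y acc]
      exact ih _

-- sorted2 with two string keys is sorted with the lexicographic pair key
theorem pv_sorted2_eq_sorted_lex {α : Type} (xs : List α) (k1 k2 : α → String) :
    PySem.List.sorted2 xs k1 k2 false
      = PySem.List.sorted xs (fun x => toLex (k1 x, k2 x)) false := by
  show xs.foldl (fun acc x => PySem.List.insertBy _ x acc) []
      = xs.foldl (fun acc x => PySem.List.insertBy _ x acc) []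
  congr 1
  funext acc x
  congr 1
  funext a c
  rcases lt_trichotomy (k1 a) (k1 c) with h | h | h
  · simp [Prod.Lex.toLex_lt_toLex, h, lt_asymm h]
  · simp [Prod.Lex.toLex_lt_toLex, h]
  · simp [Prod.Lex.toLex_lt_toLex, h, lt_asymm h, (ne_of_gt h)]

-- the sorted flat pair list equals the nested sorted iteration (on the distinct users)
theorem pv_sorted_pairs (ad : List (String × List String)) :
    PySem.List.sorted ((pvUsers ad).flatMap (fun u => (pvGetRoles ad u).map (fun r => (u, r))))
        (fun p => toLex p) false
      = (PySem.List.sorted (pvUsers ad) (fun u => u) false).flatMap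
          (fun u => (PySem.List.sorted (pvGetRoles ad u) (fun r => r) false).map (fun r => (u, r))) := by
  set pairs := (pvUsers ad).flatMap (fun u => (pvGetRoles ad u).map (fun r => (u, r))) with hpairs
  set B := (PySem.List.sorted (pvUsers ad) (fun u => u) false).flatMap
          (fun u => (PySem.List.sorted (pvGetRoles ad u) (fun r => r) false).map (fun r => (u, r))) with hB
  have husers : (PySem.List.sorted (pvUsers ad) (fun u => u) false).Perm (pvUsers ad) :=
    PySem.List.sorted_perm _ _ _
  have hperm : B.Perm pairs := by
    refine husers.flatMap ?_
    intro u _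
    exact ((PySem.List.sorted_perm (pvGetRoles ad u) (fun r => r) false).map _)
  have hnd : (PySem.List.sorted (pvUsers ad) (fun u => u) false).Nodup := by
    rw [husers.nodup_iff]
    rw [pvUsers, PySem.List.dedup_eq_ofList]
    exact PySem.Set.nodup_ofList _
  have hlt : (PySem.List.sorted (pvUsers ad) (fun u => u) false).Pairwise (· < ·) := by
    have hle := PySem.List.sorted_pairwise (pvUsers ad) (fun u => u)
    have := hle.and (List.nodup_iff_pairwise_ne.mp hnd)
    exact this.imp (fun h => lt_of_le_of_ne h.1 h.2)
  have hpw : B.Pairwise (fun p q : String × String => toLex p ≤ toLex q) := by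
    rw [hB, List.pairwise_flatMap]
    constructor
    · intro u _
      rw [List.pairwise_map]
      exact (PySem.List.sorted_pairwise (pvGetRoles ad u) (fun r => r)).imp
        (fun h => by simp [Prod.Lex.toLex_le_toLex, h])
    · refine hlt.imp ?_
      intro u v huv x hx y hy
      simp only [List.mem_map] at hx hy
      obtain ⟨r, _, rfl⟩ := hx
      obtain ⟨s, _, rfl⟩ := hy
      simp [Prod.Lex.toLex_le_toLex, huv]
  exact PySem.List.eq_of_perm_of_pairwise_le_of_injective (fun p => toLex p)
    (fun a b h => h)
    ((PySem.List.sorted_perm pairs _ false).trans hperm.symm)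
    (PySem.List.sorted_pairwise pairs _) hpw

-- ===== VERDICT (by name: the statement is the Claim_ definition above) =====
theorem convert_to_common_table_spec : Claim_equal_convert_to_common_table := by
  intro ad _
  show convert_to_common_table ad = convert_to_common_table_alt ad
  unfold convert_to_common_table convert_to_common_table_alt
  -- A's nested append loop is a flatMap of records
  have h1 : (fun (acc : List (List (String × String))) user =>
        (pvGetRoles ad user).foldl (fun acc role => acc ++ [pvRec user role]) acc)
      = fun acc user => acc ++ (pvGetRoles ad user).map (fun role => pvRec user role) := by
    funext acc user
    exact PySem.List.foldl_append_singleton_eq_map _ _ _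
  rw [h1, PySem.List.foldl_append_eq_flatMap]
  -- records are the mapped key pairs
  have h2 : (pvUsers ad).flatMap (fun u => (pvGetRoles ad u).map (fun role => pvRec u role))
      = ((pvUsers ad).flatMap (fun u => (pvGetRoles ad u).map (fun r => (u, r)))).map
          (fun p => pvRec p.1 p.2) := by
    simp [List.map_flatMap, List.map_map, Function.comp_def]
  rw [List.nil_append, h2, pv_sorted2_eq_sorted_lex, pv_sorted_map]
  have h3 : (fun p : String × String => toLex (pvKey1 (pvRec p.1 p.2), pvKey2 (pvRec p.1 p.2)))
      = fun p : String × String => toLex p := by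
    funext p
    rw [pvKey1_rec, pvKey2_rec]
  rw [h3, pv_sorted_pairs]
  simp [List.map_flatMap, List.map_map, Function.comp_def]
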